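-- pv_equiv track=rewrite | github.com/cmdowney88/SegmentalLMs | mslm/__main__.py | get_boundary_vector
-- ===== SOURCE A (Python) =====
-- from typing import Dict, List, Tuple
--
-- def get_boundary_vector(sequence: List[List[str]]) -> List[int]:
--     """
--     Extract a binary vector representing segmentation boundaries from a list of
--     segments
--
--     The vector's length is equal to the number of symbols in the
--     sequence, where for every symbol, vector(x) = 1 if there is a boundary
--     after the symbol at position x, and 0 if there is no boundary after the
--     symbol at x. If the segmentation is considered "gold", the last value will
--     be 1, otherwise 0
--
--     Args:
--         sequence: A list of segments, which are themselves lists of string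
--             symbols, from which to construct a (segment) boundary vector. Needs
--             to be a list of lists because some items representing one "symbol"
--             may be more than one character (e.g. `<tag>`)
--     Returns:
--         A list vector representing the segment boundaries (1 for boundary, 0 for
--             no boundary)
--     """
--
--     lengths = [len(segment) for segment in sequence]
--     num_symbols = sum(lengths)
--     vector = [0 for x in range(num_symbols)]
--     current_index = 0
--     for length in lengths[:-1]:
--         current_index += length
--         vector[current_index - 1] = 1
--     return vector[:-1]
-- ===== SOURCE B (Python) =====
-- from typing import Dict, List, Tuple
--
-- def get_boundary_vector(sequence: List[List[str]]) -> List[int]: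
--     """One forward pass: emit a bit per symbol while walking the segments."""
--     n = len(sequence)
--     result = []
--     for i, seg in enumerate(sequence):
--         for j in range(len(seg)):
--             result.append(1 if j == len(seg) - 1 and i != n - 1 else 0)
--     return result[:-1]
-- ===== Notes on version B (the rewrite author's own statement) =====
-- stated objective: simpler
-- what changed: Replaces A's preallocated zero vector with in-place index marking by a single forward pass that appends one bit per symbol while iterating over the segments, truncating the final bit at the end.
import Mathlib
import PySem

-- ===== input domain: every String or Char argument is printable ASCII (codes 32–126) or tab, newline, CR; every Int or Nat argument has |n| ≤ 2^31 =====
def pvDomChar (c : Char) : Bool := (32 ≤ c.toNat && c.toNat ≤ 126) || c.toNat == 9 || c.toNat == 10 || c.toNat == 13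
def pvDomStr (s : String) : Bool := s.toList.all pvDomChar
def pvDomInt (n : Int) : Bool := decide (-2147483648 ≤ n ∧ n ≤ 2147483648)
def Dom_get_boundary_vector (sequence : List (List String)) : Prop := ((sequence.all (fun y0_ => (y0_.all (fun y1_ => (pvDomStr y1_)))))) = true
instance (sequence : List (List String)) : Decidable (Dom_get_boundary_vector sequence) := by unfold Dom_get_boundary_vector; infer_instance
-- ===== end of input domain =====

-- B replaces A's preallocated zero vector + in-place index marking (with its negative-index
-- wraparound) by a single forward pass appending one bit per symbol; objective: simpler.

-- ===== PORT A =====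
-- A-side helper: the body of A's marking loop (state: (vector, current_index); none = IndexError).
def markStep (st : Option (List Int) × Int) (length : Nat) : Option (List Int) × Int :=
  match st with
  | (none, current_index) => (none, current_index)
  | (some vector, current_index) =>
    let current_index := current_index + (length : Int)
    (PySem.List.pySet? vector (current_index - 1) 1, current_index)

def get_boundary_vector (sequence : List (List String)) : List Int :=
  let lengths : List Nat := sequence.map (fun segment => segment.length)
  let num_symbols : Nat := lengths.sum
  let vector : List Int := List.replicate num_symbols 0
  let r := (PySem.List.slice lengths none (some (-1))).foldl markStep (some vector, 0)
  match r.1 with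
  | some v => PySem.List.slice v none (some (-1))
  | none => []   -- pySet? returned none: the input is outside Pre_ (Python raises IndexError)

-- ===== PORT B =====
-- B-side helper: the inner loop — append one bit per symbol of segment iseg.2 (segment index iseg.1 of n).
def emitSeg (n : Int) (result : List Int) (iseg : Int × List String) : List Int :=
  (PySem.List.pyRange 0 (iseg.2.length : Int) 1).foldl
    (fun result j =>
      result ++ [if j = (iseg.2.length : Int) - 1 ∧ iseg.1 ≠ n - 1 then (1 : Int) else 0])
    result

def get_boundary_vector_alt (sequence : List (List String)) : List Int :=
  let n : Int := sequence.length
  let result : List Int := (PySem.List.enumerate sequence 0).foldl (emitSeg n) []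
  PySem.List.slice result none (some (-1))

-- ===== PRECONDITION & SPEC =====
-- Pre_ excludes exactly the inputs where A raises IndexError: every segment empty while
-- there are at least two segments (the loop then assigns vector[-1] on an empty vector).
def Pre_get_boundary_vector (sequence : List (List String)) : Prop :=
  0 < (sequence.map (fun segment => segment.length)).sum ∨ sequence.length ≤ 1
instance (sequence : List (List String)) : Decidable (Pre_get_boundary_vector sequence) := by
  unfold Pre_get_boundary_vector; infer_instance

def pvWitness_get_boundary_vector : List (List String) := [["a"], ["b", "c"]]

def Spec_get_boundary_vector (sequence : List (List String)) (out : List Int) : Prop :=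
  out = get_boundary_vector_alt sequence
instance (sequence : List (List String)) (out : List Int) : Decidable (Spec_get_boundary_vector sequence out) := by
  unfold Spec_get_boundary_vector; infer_instance

-- ===== CLAIM (what is proved, stated in full; the proofs are below) =====
def Claim_equal_get_boundary_vector : Prop := ∀ (sequence : List (List String)), Dom_get_boundary_vector sequence → Pre_get_boundary_vector sequence → Spec_get_boundary_vector sequence (get_boundary_vector sequence)

-- ===== LEMMAS AND PROOFS =====

-- the bits B emits for one non-last segment of length l
def seg1 (l : Nat) : List Int := if l = 0 then [] else List.replicate (l - 1) 0 ++ [1]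
-- the bits B emits for the non-last segments with these lengths
def marks (L : List Nat) : List Int := L.flatMap seg1
-- the bits B emits for a segment of length l; b = "this is the last segment"
def segB (l : Nat) (b : Bool) : List Int :=
  if l = 0 then [] else List.replicate (l - 1) 0 ++ [if b then 0 else 1]
-- what B's outer fold appends for the suffix xs of the sequence, starting at index s of m
def tailFlat (m : Int) : List (List String) → Int → List Int
  | [], _ => []
  | x :: xs, s => segB x.length (decide (s = m - 1)) ++ tailFlat m xs (s + 1)

lemma length_seg1 (l : Nat) : (seg1 l).length = l := by
  unfold seg1; split <;> simp_all; omega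

lemma marks_cons (l : Nat) (L : List Nat) : marks (l :: L) = seg1 l ++ marks L := by
  unfold marks; rw [List.flatMap_cons]

lemma marks_zero_cons (L : List Nat) : marks (0 :: L) = marks L := by
  rw [marks_cons, show seg1 0 = [] from by simp [seg1]]; simp

lemma marks_sum_zero (L : List Nat) (h : L.sum = 0) : marks L = [] := by
  induction L with
  | nil => rfl
  | cons l L ih =>
    rw [List.sum_cons] at h
    rw [marks_cons, show seg1 l = [] from by
      have : l = 0 := by omega
      simp [seg1, this]]
    simpa using ih (by omega)

lemma set_append_mid (w : List Int) (x b : Int) (r : List Int) :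
    (w ++ x :: r).set w.length b = w ++ b :: r := by
  induction w with
  | nil => rfl
  | cons a w ih => simp [ih]

lemma segB_true (l : Nat) : segB l true = List.replicate l 0 := by
  unfold segB
  split
  · simp_all
  · rename_i h
    rw [show l = (l - 1) + 1 by omega, List.replicate_succ']
    simp

lemma segB_false (l : Nat) : segB l false = seg1 l := by
  simp [segB, seg1]

lemma map_range_bits (l : Nat) (q : Prop) [Decidable q] :
    (List.range l).map (fun k => if ((k : Nat) : Int) = (l : Int) - 1 ∧ q then (1 : Int) else 0)
    = if l = 0 then [] else List.replicate (l - 1) 0 ++ [if q then (1 : Int) else 0] := by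
  cases l with
  | zero => simp
  | succ m =>
    rw [List.range_succ, List.map_append, List.map_singleton]
    have h1 : (List.range m).map
        (fun k => if ((k : Nat) : Int) = ((m + 1 : Nat) : Int) - 1 ∧ q then (1 : Int) else 0)
        = List.replicate m 0 := by
      rw [List.eq_replicate_iff]
      refine ⟨by simp, ?_⟩
      intro b hb
      simp only [List.mem_map, List.mem_range] at hb
      obtain ⟨k, hk, rfl⟩ := hb
      have : ¬ (((k : Nat) : Int) = ((m + 1 : Nat) : Int) - 1 ∧ q) := by
        rintro ⟨hcon, -⟩
        push_cast at hcon
        omega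
      rw [if_neg this]
    rw [h1]
    simp

lemma inner_fold (l : Nat) (q : Prop) [Decidable q] (acc : List Int) :
    (PySem.List.pyRange 0 (l : Int) 1).foldl
      (fun result j => result ++ [if j = (l : Int) - 1 ∧ q then (1 : Int) else 0]) acc
    = acc ++ (if l = 0 then [] else List.replicate (l - 1) 0 ++ [if q then (1 : Int) else 0]) := by
  rw [PySem.List.foldl_append_singleton_eq_map
        (fun j => if j = (l : Int) - 1 ∧ q then (1 : Int) else 0)]
  rw [PySem.List.pyRange_zero_nat l, List.map_map]
  rw [show ((fun j => if j = (l : Int) - 1 ∧ q then (1 : Int) else 0) ∘ fun (k : Nat) => ((k : Nat) : Int))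
        = fun k => if ((k : Nat) : Int) = (l : Int) - 1 ∧ q then (1 : Int) else 0 from rfl]
  rw [map_range_bits]

lemma outer_fold (m : Int) (xs : List (List String)) : ∀ (s : Int) (acc : List Int),
    (PySem.List.enumerate xs s).foldl (emitSeg m) acc = acc ++ tailFlat m xs s := by
  induction xs with
  | nil => intro s acc; simp [PySem.List.enumerate_nil, tailFlat]
  | cons x xs ih =>
    intro s acc
    rw [PySem.List.enumerate_cons, List.foldl_cons, ih]
    show (emitSeg m acc (s, x)) ++ tailFlat m xs (s + 1) = _
    unfold emitSeg
    rw [inner_fold x.length (s ≠ m - 1) acc]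
    rw [show tailFlat m (x :: xs) s = segB x.length (decide (s = m - 1)) ++ tailFlat m xs (s + 1)
          from rfl]
    rw [List.append_assoc]
    congr 1
    congr 1
    by_cases hs : s = m - 1
    · rw [show decide (s = m - 1) = true from by simp [hs], segB_true]
      by_cases hx : x.length = 0
      · simp [hx]
      · rw [if_neg hx,
            show List.replicate x.length (0 : Int) = List.replicate (x.length - 1) 0 ++ [0] from by
              conv_lhs => rw [show x.length = (x.length - 1) + 1 from by omega]
              rw [List.replicate_succ']]
        simp [hs]
    · rw [show decide (s = m - 1) = false from by simp [hs], segB_false, seg1]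
      simp [hs]

lemma B_eq (sequence : List (List String)) :
    get_boundary_vector_alt sequence
      = (tailFlat (sequence.length : Int) sequence 0).dropLast := by
  show PySem.List.slice
      ((PySem.List.enumerate sequence 0).foldl (emitSeg (sequence.length : Int)) [])
      none (some (-1)) = _
  rw [outer_fold, PySem.List.slice_to_neg_one, List.nil_append]

lemma tailFlat_eq (xs : List (List String)) : ∀ (s m : Int), xs ≠ [] → s + xs.length = m →
    tailFlat m xs s
      = marks ((xs.map (fun t => t.length)).dropLast)
        ++ List.replicate ((xs.getLast?.getD []).length) 0 := by
  induction xs with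
  | nil => intro s m h _; exact absurd rfl h
  | cons x xs ih =>
    intro s m _ hsum
    cases xs with
    | nil =>
      have hs : s = m - 1 := by simp at hsum; omega
      show segB x.length (decide (s = m - 1)) ++ tailFlat m [] (s + 1) = _
      rw [show decide (s = m - 1) = true from by simp [hs], segB_true]
      simp [tailFlat, marks]
    | cons y ys =>
      have hs : ¬ (s = m - 1) := by
        simp only [List.length_cons] at hsum
        push_cast at hsum
        omega
      show segB x.length (decide (s = m - 1)) ++ tailFlat m (y :: ys) (s + 1) = _
      rw [show decide (s = m - 1) = false from by simp [hs], segB_false]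
      rw [ih (s + 1) m (by simp) (by simp only [List.length_cons] at hsum ⊢; push_cast at hsum ⊢; omega)]
      rw [show ((x :: y :: ys).map (fun t => t.length)).dropLast
            = x.length :: ((y :: ys).map (fun t => t.length)).dropLast from by
          simp [List.dropLast_cons₂]]
      rw [marks_cons, List.getLast?_cons_cons, List.append_assoc]

lemma zero_fold (L : List Nat) : ∀ (v : List Int), L.sum = 0 →
    v.getLast? = some 1 →
    L.foldl markStep (some v, (v.length : Int)) = (some v, (v.length : Int)) := by
  induction L with
  | nil => intro v _ _; rfl
  | cons l L ih =>
    intro v hs hl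
    rw [List.sum_cons] at hs
    have hl0 : l = 0 := by omega
    subst hl0
    rw [List.foldl_cons]
    obtain ⟨w, rfl⟩ := List.getLast?_eq_some_iff.mp hl
    have hstep : markStep (some (w ++ [1]), ((w ++ [1]).length : Int)) 0
        = (some (w ++ [1]), ((w ++ [1]).length : Int)) := by
      show (PySem.List.pySet? (w ++ [1]) (((w ++ [1]).length : Int) + ((0 : Nat) : Int) - 1) 1,
            ((w ++ [1]).length : Int) + ((0 : Nat) : Int)) = _
      have hidx : ((w ++ [1]).length : Int) + ((0 : Nat) : Int) - 1 = ((w.length : Nat) : Int) := by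
        push_cast [List.length_append, List.length_cons, List.length_nil]
        ring
      rw [hidx, PySem.List.pySet?_natCast _ _ _
        (by simp only [List.length_append, List.length_cons, List.length_nil]; omega)]
      rw [set_append_mid w 1 1 []]
      simp
    rw [hstep]
    exact ih (w ++ [1]) (by omega) List.getLast?_concat

lemma loop_lemma (L : List Nat) : ∀ (M : List Int) (k : Nat) (c : Int),
    (M ≠ [] → M.getLast? = some (1 : Int)) → L.sum ≤ k + 1 →
    ∃ w : List Int,
      L.foldl markStep (some (M ++ List.replicate k 0 ++ [c]), (M.length : Int))
        = (some w, (M.length : Int) + (L.sum : Int))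
      ∧ w.length = M.length + k + 1
      ∧ w.dropLast = (M ++ marks L ++ List.replicate (k + 1 - L.sum) 0).dropLast := by
  induction L with
  | nil =>
    intro M k c _ _
    refine ⟨M ++ List.replicate k 0 ++ [c], by simp, ?_, ?_⟩
    · simp only [List.length_append, List.length_replicate, List.length_cons, List.length_nil]
    · have hlhs : M ++ List.replicate k (0 : Int) ++ [c] = (M ++ List.replicate k 0) ++ [c] := by
        simp
      have hlist : M ++ marks [] ++ List.replicate (k + 1 - ([] : List Nat).sum) (0 : Int)
          = (M ++ List.replicate k 0) ++ [0] := by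
        simp [marks, List.replicate_succ']
      rw [hlhs, hlist, List.dropLast_concat, List.dropLast_concat]
  | cons l L ih =>
    intro M k c hM hsum
    rw [List.sum_cons] at hsum
    rw [List.foldl_cons]
    by_cases hl0 : l = 0
    · subst hl0
      by_cases hMe : M = []
      · subst hMe
        have hstep : markStep (some (([] : List Int) ++ List.replicate k 0 ++ [c]),
              ((([] : List Int).length : Nat) : Int)) 0
            = (some (([] : List Int) ++ List.replicate k 0 ++ [1]),
               ((([] : List Int).length : Nat) : Int)) := by
          show (PySem.List.pySet? (([] : List Int) ++ List.replicate k 0 ++ [c])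
                  (((([] : List Int).length : Nat) : Int) + ((0 : Nat) : Int) - 1) 1,
                ((([] : List Int).length : Nat) : Int) + ((0 : Nat) : Int)) = _
          have hidx : ((([] : List Int).length : Nat) : Int) + ((0 : Nat) : Int) - 1 = (-1 : Int) := by
            simp
          rw [hidx]
          simp only [Prod.mk.injEq]
          refine ⟨?_, by simp⟩
          simp only [List.nil_append]
          rw [show PySem.List.pySet? (List.replicate k (0 : Int) ++ [c]) (-1) 1
                = Option.map (fun j => (List.replicate k (0 : Int) ++ [c]).set j 1)
                    (PySem.List.pyIdx? (List.replicate k (0 : Int) ++ [c]).length (-1)) from rfl]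
          rw [show PySem.List.pyIdx? (List.replicate k (0 : Int) ++ [c]).length (-1) = some k from by
            rw [show (List.replicate k (0 : Int) ++ [c]).length = k + 1 from by simp]
            simp [PySem.List.pyIdx?]]
          rw [Option.map_some]
          rw [show (List.replicate k (0 : Int) ++ [c]).set k 1 = List.replicate k 0 ++ [1] from by
            have hsm := set_append_mid (List.replicate k (0 : Int)) c 1 []
            rw [List.length_replicate] at hsm
            exact hsm]
        rw [hstep]
        obtain ⟨w, h1, h2, h3⟩ := ih [] k 1 (by simp) (by omega)
        refine ⟨w, ?_, h2, ?_⟩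
        · rw [h1]
          simp
        · rw [h3]
          simp [marks_zero_cons]
      · obtain ⟨P, rfl⟩ := List.getLast?_eq_some_iff.mp (hM hMe)
        have hstep : markStep (some ((P ++ [1]) ++ List.replicate k 0 ++ [c]),
              (((P ++ [1]).length : Nat) : Int)) 0
            = (some ((P ++ [1]) ++ List.replicate k 0 ++ [c]),
               (((P ++ [1]).length : Nat) : Int)) := by
          show (PySem.List.pySet? ((P ++ [1]) ++ List.replicate k 0 ++ [c])
                  ((((P ++ [1]).length : Nat) : Int) + ((0 : Nat) : Int) - 1) 1,
                (((P ++ [1]).length : Nat) : Int) + ((0 : Nat) : Int)) = _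
          have hidx : (((P ++ [1]).length : Nat) : Int) + ((0 : Nat) : Int) - 1
              = ((P.length : Nat) : Int) := by
            push_cast [List.length_append, List.length_cons, List.length_nil]
            ring
          rw [hidx, PySem.List.pySet?_natCast _ _ _
            (by simp only [List.length_append, List.length_replicate, List.length_cons,
                  List.length_nil]; omega)]
          simp only [Prod.mk.injEq]
          refine ⟨?_, by simp⟩
          rw [show P ++ [1] ++ List.replicate k (0 : Int) ++ [c]
                = P ++ 1 :: (List.replicate k 0 ++ [c]) from by simp]
          rw [set_append_mid]
        rw [hstep]
        obtain ⟨w, h1, h2, h3⟩ := ih (P ++ [1]) k c hM (by omega)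
        refine ⟨w, ?_, h2, ?_⟩
        · rw [h1]
          simp
        · rw [h3]
          simp [marks_zero_cons]
    · by_cases hlk : l ≤ k
      · have hstep : markStep (some (M ++ List.replicate k 0 ++ [c]), ((M.length : Nat) : Int)) l
            = (some ((M ++ seg1 l) ++ List.replicate (k - l) 0 ++ [c]),
               (((M ++ seg1 l).length : Nat) : Int)) := by
          show (PySem.List.pySet? (M ++ List.replicate k 0 ++ [c])
                  (((M.length : Nat) : Int) + ((l : Nat) : Int) - 1) 1,
                ((M.length : Nat) : Int) + ((l : Nat) : Int)) = _
          have hidx : ((M.length : Nat) : Int) + ((l : Nat) : Int) - 1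
              = (((M.length + (l - 1)) : Nat) : Int) := by omega
          rw [hidx, PySem.List.pySet?_natCast _ _ _
            (by simp only [List.length_append, List.length_replicate, List.length_cons,
                  List.length_nil]; omega)]
          simp only [Prod.mk.injEq]
          constructor
          · have hrep : List.replicate k (0 : Int)
                = List.replicate (l - 1) 0 ++ 0 :: List.replicate (k - l) 0 := by
              rw [show (0 : Int) :: List.replicate (k - l) 0
                    = List.replicate (1 + (k - l)) 0 from by simp [List.replicate_add]]
              rw [← List.replicate_add]
              congr 1
              omega
            have hsplit : M ++ List.replicate k (0 : Int) ++ [c]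
                = (M ++ List.replicate (l - 1) 0) ++ 0 :: (List.replicate (k - l) 0 ++ [c]) := by
              rw [hrep]; simp
            rw [hsplit,
                show M.length + (l - 1) = (M ++ List.replicate (l - 1) (0 : Int)).length from by simp,
                set_append_mid]
            simp [seg1, hl0]
          · simp only [List.length_append, length_seg1]
            push_cast
            ring
        rw [hstep]
        obtain ⟨w, h1, h2, h3⟩ := ih (M ++ seg1 l) (k - l) c
          (fun _ => by
            rw [show seg1 l = List.replicate (l - 1) 0 ++ [1] from by simp [seg1, hl0],
                ← List.append_assoc]
            exact List.getLast?_concat)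
          (by omega)
        refine ⟨w, ?_, ?_, ?_⟩
        · rw [h1]
          simp only [Prod.mk.injEq, true_and, List.length_append, length_seg1, List.sum_cons]
          push_cast
          ring
        · rw [h2]
          simp only [List.length_append, length_seg1]
          omega
        · rw [h3, marks_cons]
          rw [show k - l + 1 - L.sum = k + 1 - (l :: L).sum from by
            simp only [List.sum_cons]; omega]
          simp [List.append_assoc]
      · have hl : l = k + 1 := by omega
        have hLs : L.sum = 0 := by omega
        subst hl
        have hstep : markStep (some (M ++ List.replicate k 0 ++ [c]), ((M.length : Nat) : Int)) (k + 1)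
            = (some ((M ++ List.replicate k 0) ++ [1]),
               ((((M ++ List.replicate k (0 : Int)) ++ [(1 : Int)]).length : Nat) : Int)) := by
          show (PySem.List.pySet? (M ++ List.replicate k 0 ++ [c])
                  (((M.length : Nat) : Int) + (((k + 1) : Nat) : Int) - 1) 1,
                ((M.length : Nat) : Int) + (((k + 1) : Nat) : Int)) = _
          have hidx : ((M.length : Nat) : Int) + (((k + 1) : Nat) : Int) - 1
              = (((M.length + k) : Nat) : Int) := by omega
          rw [hidx, PySem.List.pySet?_natCast _ _ _
            (by simp only [List.length_append, List.length_replicate, List.length_cons,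
                  List.length_nil]; omega)]
          simp only [Prod.mk.injEq]
          constructor
          · rw [show M.length + k = (M ++ List.replicate k (0 : Int)).length from by simp]
            rw [set_append_mid]
          · simp only [List.length_append, List.length_replicate, List.length_cons, List.length_nil]
            push_cast
            ring
        rw [hstep, zero_fold L ((M ++ List.replicate k 0) ++ [1]) hLs List.getLast?_concat]
        refine ⟨(M ++ List.replicate k 0) ++ [1], ?_, ?_, ?_⟩
        · refine Prod.ext_iff.mpr ⟨rfl, ?_⟩
          simp only [List.length_append, List.length_replicate, List.length_cons, List.length_nil,
            List.sum_cons, hLs]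
          try push_cast
          try ring
          try omega
        · simp only [List.length_append, List.length_replicate, List.length_cons, List.length_nil]
          try omega
        · have hlist : M ++ marks ((k + 1) :: L) ++ List.replicate (k + 1 - ((k + 1) :: L).sum) (0 : Int)
              = (M ++ List.replicate k 0) ++ [1] := by
            rw [marks_cons, marks_sum_zero L hLs,
                show seg1 (k + 1) = List.replicate k 0 ++ [1] from by simp [seg1],
                show k + 1 - ((k + 1) :: L).sum = 0 from by simp [List.sum_cons, hLs]]
            simp
          rw [List.dropLast_concat, hlist, List.dropLast_concat]

lemma A_eq (sequence : List (List String))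
    (h : 0 < (sequence.map (fun segment : List String => segment.length)).sum) :
    get_boundary_vector sequence
      = (marks ((sequence.map (fun segment : List String => segment.length)).dropLast)
          ++ List.replicate ((sequence.map (fun segment : List String => segment.length)).sum
              - ((sequence.map (fun segment : List String => segment.length)).dropLast).sum) 0).dropLast := by
  simp only [get_boundary_vector, PySem.List.slice_to_neg_one]
  set L := sequence.map (fun segment : List String => segment.length) with hL
  have hne : L ≠ [] := by
    intro hcon
    rw [hcon] at h
    simp at h
  have hbound : L.dropLast.sum ≤ L.sum := by
    conv_rhs => rw [← List.dropLast_concat_getLast hne]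
    simp
  have hvec : List.replicate L.sum (0 : Int) = [] ++ List.replicate (L.sum - 1) 0 ++ [0] := by
    have h1 : L.sum = (L.sum - 1) + 1 := by omega
    calc List.replicate L.sum (0 : Int) = List.replicate ((L.sum - 1) + 1) 0 := by rw [← h1]
      _ = List.replicate (L.sum - 1) 0 ++ [0] := List.replicate_succ'
      _ = [] ++ List.replicate (L.sum - 1) 0 ++ [0] := by rw [List.nil_append]
  rw [hvec]
  obtain ⟨w, h1, h2, h3⟩ := loop_lemma L.dropLast [] (L.sum - 1) 0 (by simp) (by omega)
  rw [show ((([] : List Int).length : Nat) : Int) = (0 : Int) from by simp] at h1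
  rw [h1]
  show w.dropLast = _
  rw [h3, show L.sum - 1 + 1 - L.dropLast.sum = L.sum - L.dropLast.sum from by omega]
  simp

-- ===== VERDICT (by name: the statement is the Claim_ definition above) =====
theorem get_boundary_vector_spec : Claim_equal_get_boundary_vector := by
  intro seq _ hpre
  unfold Spec_get_boundary_vector
  by_cases hN : 0 < (seq.map (fun segment => segment.length)).sum
  · have hne : seq ≠ [] := by
      rintro rfl; simp at hN
    rw [A_eq seq hN, B_eq seq, tailFlat_eq seq 0 (seq.length : Int) hne (by simp)]
    set lengths := seq.map (fun segment : List String => segment.length) with hlen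
    have hmne : lengths ≠ [] := by
      intro hcon
      rw [hcon] at hN
      simp at hN
    have h1 : lengths.getLast? = some ((seq.getLast?.getD []).length) := by
      rw [hlen, List.getLast?_map]
      cases hq : seq.getLast? with
      | none => exact absurd (List.getLast?_eq_none_iff.mp hq) hne
      | some z => simp
    have h2 : lengths.getLast? = some (lengths.getLast hmne) := List.getLast?_eq_some_getLast hmne
    have h3 : lengths.getLast hmne = (seq.getLast?.getD []).length := by
      rw [h2] at h1
      exact Option.some.inj h1
    have hNsplit : lengths.dropLast.sum + lengths.getLast hmne = lengths.sum := by
      conv_rhs => rw [← List.dropLast_concat_getLast hmne]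
      simp
    rw [show lengths.sum - lengths.dropLast.sum = (seq.getLast?.getD []).length from by
      rw [← h3]; omega]
  · rcases hpre with hpre | hpre
    · exact absurd hpre hN
    · cases seq with
      | nil => decide
      | cons x xs =>
        cases xs with
        | nil =>
          have hx : x = [] := by simpa using hN
          subst hx
          decide
        | cons y ys => simp at hpre
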